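-- pv_equiv track=rewrite | github.com/ddb8036631/algorithm | src/수학/boj_15970.py | calc
-- ===== SOURCE A (Python) =====
-- def calc(arr):
--     sum = 0
--     for i in range(len(arr)):
--         if i == 0:
--             sum += arr[1] - arr[0]
--         elif i == len(arr) - 1:
--             sum += arr[i] - arr[i - 1]
--         else:
--             sum += arr[i] - arr[i - 1] if arr[i + 1] - arr[i] >= arr[i] - arr[i - 1] else arr[i + 1] - arr[i]
--
--     return sum
-- ===== SOURCE B (Python) =====
-- def calc(arr):
--     gaps = [b - a for a, b in zip(arr, arr[1:])]
--     total = 0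
--     for j, g in enumerate(gaps):
--         uses = 0
--         if j == 0 or g < gaps[j - 1]:
--             uses += 1
--         if j == len(gaps) - 1 or gaps[j + 1] >= g:
--             uses += 1
--         total += uses * g
--     return total
-- ===== Notes on version B (the rewrite author's own statement) =====
-- stated objective: alternative
-- what changed: B sums per-gap contributions: each consecutive gap is multiplied by the number of adjacent elements whose nearest neighbor lies across that gap (0/1/2), instead of A's per-element min-of-neighbors accumulation.
import Mathlib
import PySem

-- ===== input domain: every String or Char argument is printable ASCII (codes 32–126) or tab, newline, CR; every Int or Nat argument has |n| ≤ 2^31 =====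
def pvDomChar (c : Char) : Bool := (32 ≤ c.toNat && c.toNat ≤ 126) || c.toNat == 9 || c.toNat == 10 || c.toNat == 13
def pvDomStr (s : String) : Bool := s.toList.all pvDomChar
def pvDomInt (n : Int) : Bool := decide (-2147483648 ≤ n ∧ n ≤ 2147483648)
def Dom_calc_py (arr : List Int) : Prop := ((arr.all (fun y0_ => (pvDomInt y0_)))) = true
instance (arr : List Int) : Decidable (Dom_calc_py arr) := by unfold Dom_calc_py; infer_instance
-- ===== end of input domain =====

-- B sums per-gap contributions (each gap times the number of adjacent elements whose
-- nearest neighbor lies across it) instead of A's per-element min accumulation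
-- (objective: alternative).

-- ===== PORT A =====
def calc_py (arr : List Int) : Int :=
  (PySem.List.pyRange 0 (PySem.List.len arr) 1).foldl (fun sum i =>
    if i = 0 then
      sum + (PySem.List.pyGetD arr 1 0 - PySem.List.pyGetD arr 0 0)
    else if i = PySem.List.len arr - 1 then
      sum + (PySem.List.pyGetD arr i 0 - PySem.List.pyGetD arr (i - 1) 0)
    else
      sum + (if PySem.List.pyGetD arr (i + 1) 0 - PySem.List.pyGetD arr i 0 ≥
               PySem.List.pyGetD arr i 0 - PySem.List.pyGetD arr (i - 1) 0 then
               PySem.List.pyGetD arr i 0 - PySem.List.pyGetD arr (i - 1) 0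
             else
               PySem.List.pyGetD arr (i + 1) 0 - PySem.List.pyGetD arr i 0)) 0

-- ===== PORT B =====
-- zip(arr, arr[1:]) is List.zip arr (arr.drop 1): exact, since the slice [1:] with a
-- nonnegative start is List.drop 1.
def calc_py_alt (arr : List Int) : Int :=
  let gaps := (arr.zip (arr.drop 1)).map (fun p => p.2 - p.1)
  (PySem.List.enumerate gaps 0).foldl (fun total jg =>
    total +
      ((if jg.1 = 0 ∨ jg.2 < PySem.List.pyGetD gaps (jg.1 - 1) 0 then 1 else 0) +
       (if jg.1 = PySem.List.len gaps - 1 ∨ PySem.List.pyGetD gaps (jg.1 + 1) 0 ≥ jg.2 then 1 else 0))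
      * jg.2) 0

-- ===== PRECONDITION & SPEC =====
-- Pre_ excludes exactly the length-1 lists, on which A raises IndexError (arr[1]).
def Pre_calc_py (arr : List Int) : Prop := arr.length ≠ 1
instance (arr : List Int) : Decidable (Pre_calc_py arr) := by unfold Pre_calc_py; infer_instance
def pvWitness_calc_py : List Int := ([1, 3, 6] : List Int)

def Spec_calc_py (arr : List Int) (out : Int) : Prop := out = calc_py_alt arr
instance (arr : List Int) (out : Int) : Decidable (Spec_calc_py arr out) := by unfold Spec_calc_py; infer_instance

-- ===== CLAIM (what is proved, stated in full; the proofs are below) =====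
def Claim_equal_calc_py : Prop := ∀ (arr : List Int), Dom_calc_py arr → Pre_calc_py arr → Spec_calc_py arr (calc_py arr)

-- ===== LEMMAS AND PROOFS =====

-- The gap list zip(arr, arr[1:]) mapped to differences, written as a comprehension over indices.
theorem gaps_eq (arr : List Int) :
    (arr.zip (arr.drop 1)).map (fun p => p.2 - p.1)
      = (PySem.List.pyRange 0 ((arr.length : Int) - 1) 1).map
          (fun i => PySem.List.pyGetD arr (i + 1) 0 - PySem.List.pyGetD arr i 0) := by
  apply List.ext_getElem
  · simp [PySem.List.length_pyRange_one]
  · intro k h1 h2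
    simp only [List.getElem_map, List.getElem_zip, List.getElem_drop,
      PySem.List.getElem_pyRange_one]
    simp at h1
    rw [show ((0:Int) + k + 1) = ((k+1 : Nat) : Int) by push_cast; ring,
        PySem.List.pyGetD_natCast]
    rw [show ((0:Int) + (k:Int)) = ((k : Nat) : Int) by norm_num,
        PySem.List.pyGetD_natCast]
    rw [List.getD_eq_getElem arr 0 (by omega : k + 1 < arr.length),
        List.getD_eq_getElem arr 0 (by omega : k < arr.length)]
    congr 2
    omega

-- Main equivalence on lists of length ≥ 2: both sides reduce to
-- f 0 + Σ_{i∈[1,m)} (min-of-neighbor-gaps term) + f (m-1) over the gap function f.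
theorem calc_py_eq_alt_of_two_le (arr : List Int) (hn : 2 ≤ arr.length) : calc_py arr = calc_py_alt arr := by
  set N : Int := (arr.length : Int) with hN
  have hN2 : 2 ≤ N := by rw [hN]; exact_mod_cast hn
  clear_value N
  set f : Int → Int := fun i => PySem.List.pyGetD arr (i + 1) 0 - PySem.List.pyGetD arr i 0 with hf
  set m : Int := N - 1 with hm
  clear_value m
  set G : List Int := (PySem.List.pyRange 0 m 1).map f with hG
  -- ---------- A as  f 0 + Σ_{i∈[1,m)} aI i + f (m-1) ----------
  set aI : Int → Int := fun i => if f i ≥ f (i - 1) then f (i - 1) else f i with haI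
  set gA : Int → Int := fun i =>
    if i = 0 then PySem.List.pyGetD arr 1 0 - PySem.List.pyGetD arr 0 0
    else if i = N - 1 then PySem.List.pyGetD arr i 0 - PySem.List.pyGetD arr (i - 1) 0
    else (if PySem.List.pyGetD arr (i + 1) 0 - PySem.List.pyGetD arr i 0 ≥
               PySem.List.pyGetD arr i 0 - PySem.List.pyGetD arr (i - 1) 0 then
               PySem.List.pyGetD arr i 0 - PySem.List.pyGetD arr (i - 1) 0
             else
               PySem.List.pyGetD arr (i + 1) 0 - PySem.List.pyGetD arr i 0) with hgA
  have hA : calc_py arr = ((PySem.List.pyRange 0 N 1).map gA).sum := by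
    show (PySem.List.pyRange 0 (PySem.List.len arr) 1).foldl _ 0 = _
    rw [PySem.List.len_eq, ← hN]
    have hfun : (fun (sum i : Int) =>
      if i = 0 then
        sum + (PySem.List.pyGetD arr 1 0 - PySem.List.pyGetD arr 0 0)
      else if i = N - 1 then
        sum + (PySem.List.pyGetD arr i 0 - PySem.List.pyGetD arr (i - 1) 0)
      else
        sum + (if PySem.List.pyGetD arr (i + 1) 0 - PySem.List.pyGetD arr i 0 ≥
                 PySem.List.pyGetD arr i 0 - PySem.List.pyGetD arr (i - 1) 0 then
                 PySem.List.pyGetD arr i 0 - PySem.List.pyGetD arr (i - 1) 0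
               else
                 PySem.List.pyGetD arr (i + 1) 0 - PySem.List.pyGetD arr i 0))
        = (fun sum i => sum + gA i) := by
      funext s i; rw [hgA]; beta_reduce; split_ifs <;> rfl
    rw [hfun, PySem.List.foldl_add, zero_add]
  have hsplit : PySem.List.pyRange 0 N 1
      = [0] ++ PySem.List.pyRange 1 (N - 1) 1 ++ [N - 1] := by
    rw [PySem.List.pyRange_one_append 0 (N - 1) N (by omega) (by omega)]
    have h1 : PySem.List.pyRange 0 (N - 1) 1 = 0 :: PySem.List.pyRange 1 (N - 1) 1 := by
      rw [PySem.List.pyRange_one_cons (by omega)]; norm_num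
    have h2 : PySem.List.pyRange (N - 1) N 1 = [N - 1] := by
      obtain ⟨M, rfl⟩ : ∃ M, N = M + 1 := ⟨N - 1, by omega⟩
      have e1 : M + 1 - 1 = M := by omega
      rw [e1, PySem.List.pyRange_one_singleton]
    rw [h1, h2]; rfl
  have hA0 : gA 0 = f 0 := by rw [hgA, hf]; norm_num
  have hAl : gA (N - 1) = f (m - 1) := by
    rw [hgA, hf]
    beta_reduce
    rw [if_neg (by omega), if_pos rfl]
    have h1 : m - 1 + 1 = N - 1 := by omega
    rw [h1]
    congr 2
    omega
  have hint : (PySem.List.pyRange 1 (N - 1) 1).map gA = (PySem.List.pyRange 1 m 1).map aI := by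
    rw [show N - 1 = m from hm.symm]
    apply List.map_congr_left
    intro i hi
    rw [PySem.List.mem_pyRange_one] at hi
    rw [hgA, haI, hf]
    beta_reduce
    rw [if_neg (by omega), if_neg (by omega)]
    have h1 : i - 1 + 1 = i := by ring
    rw [h1]
  have hAfinal : calc_py arr = f 0 + ((PySem.List.pyRange 1 m 1).map aI).sum + f (m - 1) := by
    rw [hA, hsplit]
    simp only [List.map_append, List.sum_append, List.map_cons, List.map_nil, List.sum_cons,
      List.sum_nil, List.cons_append, List.nil_append, hint, hA0, hAl]
    ring
  -- ---------- B as  Σ_{j∈[0,m)} (LL j + RR j) ----------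
  set LL : Int → Int := fun j =>
    if j = 0 ∨ f j < PySem.List.pyGetD G (j - 1) 0 then f j else 0 with hLL
  set RR : Int → Int := fun j =>
    if j = m - 1 ∨ PySem.List.pyGetD G (j + 1) 0 ≥ f j then f j else 0 with hRR
  have hlenG : PySem.List.len G = m := by
    rw [hG, PySem.List.len_eq]
    simp [PySem.List.length_pyRange_one]
    omega
  have hB : calc_py_alt arr
      = ((PySem.List.pyRange 0 m 1).map (fun j => LL j + RR j)).sum := by
    show (PySem.List.enumerate ((arr.zip (arr.drop 1)).map (fun p => p.2 - p.1)) 0).foldl _ 0 = _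
    rw [gaps_eq, ← hN, ← hm, ← hf, ← hG]
    rw [PySem.List.enumerate_eq_map_pyRange G 0, hlenG]
    rw [PySem.List.foldl_add, zero_add, List.map_map]
    apply congrArg
    apply List.map_congr_left
    intro j hj
    rw [PySem.List.mem_pyRange_one] at hj
    simp only [Function.comp]
    have hgj : PySem.List.pyGetD G j 0 = f j := by
      rw [hG]; exact PySem.List.pyGetD_map_pyRange_of_nonneg f m j 0 (by omega) (by omega)
    simp only [hgj, hLL, hRR]
    split_ifs <;> ring
  -- split Σ(LL+RR) and reshape each piece
  have hBsum : calc_py_alt arr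
      = (LL 0 + ((PySem.List.pyRange 1 m 1).map LL).sum)
        + (((PySem.List.pyRange 0 (m - 1) 1).map RR).sum + RR (m - 1)) := by
    rw [hB]
    have hadd : ((PySem.List.pyRange 0 m 1).map (fun j => LL j + RR j)).sum
        = ((PySem.List.pyRange 0 m 1).map LL).sum + ((PySem.List.pyRange 0 m 1).map RR).sum :=
      PySem.List.sum_map_add_int _ _ _
    rw [hadd]
    have hLsplit : PySem.List.pyRange 0 m 1 = 0 :: PySem.List.pyRange 1 m 1 := by
      rw [PySem.List.pyRange_one_cons (by omega)]; norm_num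
    have hRsplit : PySem.List.pyRange 0 m 1
        = PySem.List.pyRange 0 (m - 1) 1 ++ [m - 1] := by
      obtain ⟨M, rfl⟩ : ∃ M, m = M + 1 := ⟨m - 1, by omega⟩
      have e1 : M + 1 - 1 = M := by omega
      rw [e1, PySem.List.pyRange_one_succ_right (by omega)]
    have hLs : (List.map LL (PySem.List.pyRange 0 m 1)).sum
        = LL 0 + (List.map LL (PySem.List.pyRange 1 m 1)).sum := by
      rw [hLsplit]; simp
    have hRs : (List.map RR (PySem.List.pyRange 0 m 1)).sum
        = (List.map RR (PySem.List.pyRange 0 (m - 1) 1)).sum + RR (m - 1) := by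
      rw [hRsplit]; simp
    rw [hLs, hRs]
  have hL0 : LL 0 = f 0 := by rw [hLL]; exact if_pos (Or.inl rfl)
  have hRl : RR (m - 1) = f (m - 1) := by rw [hRR]; exact if_pos (Or.inl rfl)
  -- reindex the RR sum to [1,m) and merge pointwise with LL into aI
  have hmerge : ((PySem.List.pyRange 1 m 1).map LL).sum
      + ((PySem.List.pyRange 0 (m - 1) 1).map RR).sum
      = ((PySem.List.pyRange 1 m 1).map aI).sum := by
    have hre : (PySem.List.pyRange 0 (m - 1) 1).map RR
        = (PySem.List.pyRange 1 m 1).map (fun i => RR (i - 1)) := by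
      rw [PySem.List.pyRange_one 0 (m - 1), PySem.List.pyRange_one 1 m,
          List.map_map, List.map_map]
      have e1 : (m - 1 - 0).toNat = (m - 1).toNat := by omega
      rw [e1]
      apply List.map_congr_left
      intro k _
      simp only [Function.comp]
      congr 1
      ring
    rw [hre, ← PySem.List.sum_map_add_int]
    apply congrArg
    apply List.map_congr_left
    intro i hi
    rw [PySem.List.mem_pyRange_one] at hi
    have hg1 : PySem.List.pyGetD G (i - 1) 0 = f (i - 1) := by
      rw [hG]; exact PySem.List.pyGetD_map_pyRange_of_nonneg f m (i - 1) 0 (by omega) (by omega)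
    have hg2 : PySem.List.pyGetD G (i - 1 + 1) 0 = f i := by
      rw [show i - 1 + 1 = i by ring, hG]
      exact PySem.List.pyGetD_map_pyRange_of_nonneg f m i 0 (by omega) (by omega)
    rw [hLL, hRR, haI]
    beta_reduce
    rw [hg1, hg2]
    by_cases h : f i ≥ f (i - 1)
    · rw [if_neg (fun hc => hc.elim (fun h1 => by omega) (fun h2 => absurd h (not_le.mpr h2))),
          if_pos (Or.inr h), if_pos h]
      ring
    · rw [ge_iff_le, not_le] at h
      rw [if_pos (Or.inr h), if_neg (not_le.mpr h),
          if_neg (fun hc => hc.elim (fun h1 => by omega) (fun h2 => absurd h (not_lt.mpr h2)))]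
      ring
  rw [hAfinal, hBsum, hL0, hRl, ← hmerge]
  ring


-- ===== VERDICT (by name: the statement is the Claim_ definition above) =====
theorem calc_py_spec : Claim_equal_calc_py := by
  intro arr _ hpre
  show calc_py arr = calc_py_alt arr
  rcases arr with _ | ⟨a, rest⟩
  · rfl
  · exact calc_py_eq_alt_of_two_le (a :: rest) (by
      have : (a :: rest).length ≠ 1 := hpre
      simp only [List.length_cons] at this ⊢
      omega)
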